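-- pv_equiv track=rewrite | github.com/SetayeshMoosavi/basic-python-projects | project2.py | ischarkhesh
-- ===== SOURCE A (Python) =====
-- def ischarkhesh(n):
--
--     l=[]
--     count=0
--     charkheshlist=[]
--     b=n
--     while b!=0:
--         a=b//10
--         c=b%10
--         l.append(c)
--         b=a
--         count=count+1
--
--     def charkhesh(n):
--         for j in range(count):
--             a=n//((10)**(count-1))
--             b=n%((10)**(count-1))
--             y=(b*10)+a
--             charkheshlist.append(y)
--             n=y
--         return (charkheshlist)
--
--     def isprime(n):
--         h = 0
--         if n == 1 or n == 0:
--             return False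
--         else:
--             for i in range(2, n):
--                 if n % i == 0:
--                     h = h + 1
--             if h > 0:
--                 return False
--             else:
--                 return True
--
--     o=0
--     for j in range (count):
--         if isprime(charkhesh(n)[j]):
--             o=o+1
--     if o==count:
--         return True
-- ===== SOURCE B (Python) =====
-- def ischarkhesh(n):
--     def isprime(m):
--         if m < 2:
--             return False
--         i = 2
--         while i * i <= m:
--             if m % i == 0:
--                 return False
--             i += 1
--         return True
--
--     c = 0
--     while 10 ** c <= n:
--         c += 1
--     if all(isprime((n % 10 ** (c - j)) * 10 ** j + n // 10 ** (c - j))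
--            for j in range(1, c + 1)):
--         return True
-- ===== Notes on version B (the rewrite author's own statement) =====
-- stated objective: faster
-- what changed: B derives each digit rotation independently from n with a single mod/div split at the matching power of the base (instead of threading rotations one digit at a time through a shared, repeatedly re-extended list), counts the digits by comparing successive powers of the base against n, and tests primality by trial division with early exit up to the square root (instead of counting every smaller divisor).
import Mathlib
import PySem

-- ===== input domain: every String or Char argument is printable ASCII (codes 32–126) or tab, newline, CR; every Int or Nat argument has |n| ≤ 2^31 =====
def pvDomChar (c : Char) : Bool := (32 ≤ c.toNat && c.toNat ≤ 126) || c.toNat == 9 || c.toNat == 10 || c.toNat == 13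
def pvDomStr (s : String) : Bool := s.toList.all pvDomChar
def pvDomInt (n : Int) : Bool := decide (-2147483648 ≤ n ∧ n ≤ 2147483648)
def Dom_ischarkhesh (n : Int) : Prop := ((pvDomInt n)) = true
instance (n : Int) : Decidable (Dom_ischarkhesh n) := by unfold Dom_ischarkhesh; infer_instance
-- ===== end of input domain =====

-- B generates each digit rotation independently from n by one mod/div split (instead of threading
-- rotations through a growing shared list) and tests primality by trial division up to the square
-- root (instead of counting all divisors below m): an asymptotically faster, simpler check.

-- ===== PORT A =====
-- while b != 0: a = b//10; c = b%10; l.append(c); b = a; count += 1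
-- (fuel recursion: the fuel n.natAbs+1 is an upper bound on the iterations whenever the
--  Python loop terminates, i.e. for n ≥ 0; for n < 0 the Python loop never terminates.)
def pvACountLoop : Nat → Int → List Int × Nat → List Int × Nat
  | 0, _, st => st
  | f + 1, b, (l, count) =>
    if b ≠ 0 then
      pvACountLoop f (PySem.Int.floordiv b 10) (l ++ [PySem.Int.mod b 10], count + 1)
    else (l, count)

-- def charkhesh(n): for j in range(count): a = n//10**(count-1); b = n%10**(count-1);
--   y = b*10+a; charkheshlist.append(y); n = y; return charkheshlist
-- (k counts the remaining iterations of `for j in range(count)`; the state is (n, charkheshlist))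
def pvACharkhesh (count : Nat) : Nat → Int × List Int → Int × List Int
  | 0, st => st
  | k + 1, (m, cl) =>
    let a := PySem.Int.floordiv m (10 ^ (count - 1))
    let b := PySem.Int.mod m (10 ^ (count - 1))
    let y := b * 10 + a
    pvACharkhesh count k (y, cl ++ [y])

-- def isprime(n): h = 0; if n == 1 or n == 0: return False;
--   else: for i in range(2, n): if n % i == 0: h += 1;  return False if h > 0 else True
def pvAIsprime (m : Int) : Bool :=
  if m = 1 ∨ m = 0 then false
  else
    let h := (PySem.List.pyRange 2 m 1).foldl
      (fun h i => if PySem.Int.mod m i = 0 then h + 1 else h) (0 : Int)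
    if h > 0 then false else true

-- o = 0; for j in range(count): if isprime(charkhesh(n)[j]): o += 1; if o == count: return True
-- (the state is (charkheshlist, o); charkhesh(n) appends to the shared charkheshlist and returns it;
--  the index j is always in range there, so `.getD 0` is never taken on a `none`.)
def ischarkhesh (n : Int) : Option Bool :=
  let count := (pvACountLoop (n.natAbs + 1) n ([], 0)).2
  let res := (List.range count).foldl
    (fun (st : List Int × Nat) (j : Nat) =>
      let cl := (pvACharkhesh count count (n, st.1)).2
      if pvAIsprime ((PySem.List.pyGet? cl ((j : Nat) : Int)).getD 0) then (cl, st.2 + 1)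
      else (cl, st.2))
    ([], 0)
  if res.2 = count then some true else none

-- ===== PORT B =====
-- i = 2; while i * i <= m: if m % i == 0: return False; i += 1; return True
def pvBTrial (m i : Int) : Bool :=
  if h : i * i ≤ m then
    if PySem.Int.mod m i = 0 then false else pvBTrial m (i + 1)
  else true
termination_by (m + 2 - i).toNat
decreasing_by
  have hi : i ≤ m + 1 := by nlinarith [sq_nonneg (i - 1)]
  omega

def pvBIsprime (m : Int) : Bool := if m < 2 then false else pvBTrial m 2

-- c = 0; while 10 ** c <= n: c += 1    (fuel n.natAbs+1 bounds the iterations: 10^c > c)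
def pvBPowLoop (n : Int) : Nat → Nat → Nat
  | 0, c => c
  | f + 1, c => if (10 : Int) ^ c ≤ n then pvBPowLoop n f (c + 1) else c

-- if all(isprime((n % 10**(c-j)) * 10**j + n // 10**(c-j)) for j in range(1, c+1)): return True
def ischarkhesh_alt (n : Int) : Option Bool :=
  let c := pvBPowLoop n (n.natAbs + 1) 0
  if (PySem.List.pyRange 1 ((c : Int) + 1) 1).all (fun j =>
      pvBIsprime (PySem.Int.mod n (10 ^ (c - j.toNat)) * 10 ^ j.toNat
        + PySem.Int.floordiv n (10 ^ (c - j.toNat))))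
  then some true else none

-- ===== PRECONDITION & SPEC =====
-- Pre_ excludes exactly the negative inputs: there A's digit-extraction while-loop never
-- terminates (repeated floor division keeps b negative, so the exit test never fires);
-- A returns on no input outside Pre_.
def Pre_ischarkhesh (n : Int) : Prop := 0 ≤ n
instance (n : Int) : Decidable (Pre_ischarkhesh n) := by unfold Pre_ischarkhesh; infer_instance
def pvWitness_ischarkhesh : Int := (197)

def Spec_ischarkhesh (n : Int) (out : Option Bool) : Prop := out = ischarkhesh_alt n
instance (n : Int) (out : Option Bool) : Decidable (Spec_ischarkhesh n out) := by unfold Spec_ischarkhesh; infer_instance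

-- ===== CLAIM (what is proved, stated in full; the proofs are below) =====
def Claim_equal_ischarkhesh : Prop := ∀ (n : Int), Dom_ischarkhesh n → Pre_ischarkhesh n → Spec_ischarkhesh n (ischarkhesh n)

-- ===== LEMMAS AND PROOFS =====

-- number of decimal digits (0 for 0); both ports' counting loops compute it
def pvND (m : Nat) : Nat :=
  if m = 0 then 0 else pvND (m / 10) + 1
decreasing_by exact Nat.div_lt_self (by omega) (by omega)

theorem pvND_lt (m : Nat) : m < 10 ^ pvND m := by
  induction m using pvND.induct with
  | case1 => simp [pvND]
  | case2 m h ih =>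
    rw [pvND, if_neg h, pow_succ]
    have := Nat.div_add_mod m 10
    omega

theorem pvND_le_of_lt {m c : Nat} (h : m < 10 ^ c) : pvND m ≤ c := by
  induction m using pvND.induct generalizing c with
  | case1 => simp [pvND]
  | case2 m hm ih =>
    rw [pvND, if_neg hm]
    rcases c with _ | c
    · simp at h; omega
    · have : m / 10 < 10 ^ c := by
        rw [Nat.div_lt_iff_lt_mul (by omega)]
        calc m < 10 ^ (c + 1) := h
        _ = 10 ^ c * 10 := by ring
      exact Nat.succ_le_succ (ih this)

theorem pvND_le_self (m : Nat) : pvND m ≤ m := by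
  induction m using pvND.induct with
  | case1 => simp [pvND]
  | case2 m hm ih =>
    rw [pvND, if_neg hm]
    have := Nat.div_lt_self (n := m) (k := 10) (by omega) (by omega)
    omega

theorem pvACountLoop_spec : ∀ (fuel m : Nat), m < fuel → ∀ (l : List Int) (c : Nat),
    (pvACountLoop fuel (m : Int) (l, c)).2 = c + pvND m := by
  intro fuel
  induction fuel with
  | zero => intro m h; omega
  | succ f ih =>
    intro m h l c
    rw [pvACountLoop]
    by_cases hm : m = 0
    · subst hm; simp [pvND]
    · rw [if_pos (by exact_mod_cast hm)]
      rw [show PySem.Int.floordiv (m : Int) 10 = ((m / 10 : Nat) : Int) from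
        PySem.Int.floordiv_natCast m 10]
      have hrec : pvND m = pvND (m / 10) + 1 := by rw [pvND]; simp [hm]
      rw [ih (m / 10) (by have := Nat.div_lt_self (n := m) (k := 10) (by omega) (by omega); omega)]
      omega

theorem pvBPowLoop_spec (n : Int) (hn : 0 ≤ n) :
    ∀ (fuel c : Nat), c ≤ pvND n.toNat → pvND n.toNat ≤ c + fuel →
    pvBPowLoop n fuel c = pvND n.toNat := by
  intro fuel
  induction fuel with
  | zero => intro c h1 h2; simp [pvBPowLoop]; omega
  | succ f ih =>
    intro c h1 h2
    rw [pvBPowLoop]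
    by_cases hc : (10 : Int) ^ c ≤ n
    · rw [if_pos hc]
      have hcn : 10 ^ c ≤ n.toNat := by
        have : ((10 ^ c : Nat) : Int) ≤ n := by push_cast; exact hc
        omega
      have hlt : c < pvND n.toNat := by
        by_contra hh
        have : pvND n.toNat ≤ c := by omega
        have := Nat.lt_of_lt_of_le (pvND_lt n.toNat) (Nat.pow_le_pow_right (by omega) this)
        omega
      exact ih (c + 1) (by omega) (by omega)
    · rw [if_neg hc]
      have : n.toNat < 10 ^ c := by
        by_contra hh
        have : ((10 ^ c : Nat) : Int) ≤ (n.toNat : Int) := by exact_mod_cast Nat.le_of_not_lt hh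
        rw [Int.toNat_of_nonneg hn] at this
        push_cast at this
        omega
      have := pvND_le_of_lt this
      omega

-- one rotation step of A's inner loop (b*10+a for a = m // 10^(count-1), b = m % 10^(count-1))
def pvStep (count : Nat) (m : Int) : Int :=
  PySem.Int.mod m (10 ^ (count - 1)) * 10 + PySem.Int.floordiv m (10 ^ (count - 1))

-- the values appended by one call of charkhesh
def pvRotL (count : Nat) : Nat → Int → List Int
  | 0, _ => []
  | k + 1, m => pvStep count m :: pvRotL count k (pvStep count m)

theorem pvACharkhesh_spec (count : Nat) : ∀ (k : Nat) (m : Int) (cl : List Int),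
    pvACharkhesh count k (m, cl) = ((pvStep count)^[k] m, cl ++ pvRotL count k m) := by
  intro k
  induction k with
  | zero => intro m cl; simp [pvACharkhesh, pvRotL]
  | succ k ih =>
    intro m cl
    show pvACharkhesh count k (pvStep count m, cl ++ [pvStep count m]) = _
    rw [ih]
    simp [Function.iterate_succ_apply, pvRotL]

theorem pvRotL_length (count : Nat) : ∀ (k : Nat) (m : Int), (pvRotL count k m).length = k := by
  intro k
  induction k with
  | zero => intro m; simp [pvRotL]
  | succ k ih => intro m; simp [pvRotL, ih]

theorem pvRotL_getElem? (count : Nat) : ∀ (k j : Nat) (m : Int), j < k →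
    (pvRotL count k m)[j]? = some ((pvStep count)^[j + 1] m) := by
  intro k
  induction k with
  | zero => omega
  | succ k ih =>
    intro j m hj
    rcases j with _ | j
    · simp [pvRotL]
    · rw [pvRotL]
      rw [List.getElem?_cons_succ, ih j _ (by omega), Function.iterate_succ_apply]
      simp [Function.iterate_succ_apply]

-- invariant of A's outer loop: the shared list holds t concatenated copies of the rotation
-- block R, and o counts the prime rotations among the first t
theorem pvAOuter_spec (n : Int) (count : Nat) : ∀ (t : Nat), t ≤ count →
    (List.range t).foldl
      (fun (st : List Int × Nat) (j : Nat) =>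
        let cl := (pvACharkhesh count count (n, st.1)).2
        if pvAIsprime ((PySem.List.pyGet? cl ((j : Nat) : Int)).getD 0) then (cl, st.2 + 1)
        else (cl, st.2))
      ([], 0)
    = ((List.replicate t (pvRotL count count n)).flatten,
       (List.range t).countP (fun j => pvAIsprime ((pvStep count)^[j + 1] n))) := by
  intro t
  induction t with
  | zero => intro _; simp
  | succ t ih =>
    intro ht
    rw [List.range_succ, List.foldl_append, ih (by omega)]
    have hcl : (pvACharkhesh count count (n, (List.replicate t (pvRotL count count n)).flatten)).2
        = (List.replicate (t + 1) (pvRotL count count n)).flatten := by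
      rw [pvACharkhesh_spec, List.replicate_succ', List.flatten_append]
      simp
    have hget : (PySem.List.pyGet?
        ((List.replicate (t + 1) (pvRotL count count n)).flatten) ((t : Nat) : Int)).getD 0
        = (pvStep count)^[t + 1] n := by
      rw [PySem.List.pyGet?_natCast, List.replicate_succ, List.flatten_cons,
        List.getElem?_append_left (by rw [pvRotL_length]; omega),
        pvRotL_getElem? count count t n (by omega)]
      rfl
    simp only [List.foldl_cons, List.foldl_nil, hcl, hget]
    rw [List.countP_append]
    simp only [Function.iterate_succ_apply, List.countP_cons, List.countP_nil]
    split_ifs with h <;> simp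

-- ===== the Nat-side rotation arithmetic =====

-- one step of the digit rotation, computed directly from the original number
theorem pvRot_step_core (e j m : Nat) (hm : m < 10 ^ (e + 1 + j)) :
    ((m % 10 ^ (e + 1) * 10 ^ j + m / 10 ^ (e + 1)) % 10 ^ (e + j)) * 10
      + (m % 10 ^ (e + 1) * 10 ^ j + m / 10 ^ (e + 1)) / 10 ^ (e + j)
    = (m % 10 ^ e) * 10 ^ (j + 1) + m / 10 ^ e := by
  set q := m / 10 ^ (e + 1) with hq
  set r := m % 10 ^ (e + 1) with hr
  have hqlt : q < 10 ^ j := by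
    rw [hq, Nat.div_lt_iff_lt_mul (Nat.pow_pos (by omega))]
    calc m < 10 ^ (e + 1 + j) := hm
    _ = 10 ^ j * 10 ^ (e + 1) := by rw [← pow_add]; ring_nf
  have hrlt : r < 10 ^ (e + 1) := Nat.mod_lt _ (Nat.pow_pos (by omega))
  have hsplit : r * 10 ^ j + q
      = (r / 10 ^ e) * 10 ^ (e + j) + ((r % 10 ^ e) * 10 ^ j + q) := by
    have := Nat.div_add_mod r (10 ^ e)
    calc r * 10 ^ j + q = ((10 ^ e * (r / 10 ^ e)) + r % 10 ^ e) * 10 ^ j + q := by rw [this]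
    _ = (r / 10 ^ e) * (10 ^ e * 10 ^ j) + ((r % 10 ^ e) * 10 ^ j + q) := by ring
    _ = _ := by rw [← pow_add]
  have hBlt : (r % 10 ^ e) * 10 ^ j + q < 10 ^ (e + j) := by
    have h1 : r % 10 ^ e < 10 ^ e := Nat.mod_lt _ (Nat.pow_pos (by omega))
    have h4 : r % 10 ^ e * 10 ^ j + 10 ^ j ≤ 10 ^ e * 10 ^ j := by
      have := Nat.mul_le_mul_right (k := 10 ^ j) (Nat.succ_le_of_lt h1)
      calc r % 10 ^ e * 10 ^ j + 10 ^ j = (r % 10 ^ e + 1) * 10 ^ j := by ring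
      _ ≤ 10 ^ e * 10 ^ j := this
    rw [pow_add]
    linarith [hqlt]
  rw [hsplit]
  rw [Nat.add_comm ((r / 10 ^ e) * 10 ^ (e + j)) _]
  rw [Nat.add_mul_div_right _ _ (Nat.pow_pos (by omega)),
      Nat.add_mul_mod_self_right]
  rw [Nat.div_eq_of_lt hBlt, Nat.mod_eq_of_lt hBlt]
  have hmod : m % 10 ^ e = r % 10 ^ e :=
    (Nat.mod_mod_of_dvd m (pow_dvd_pow 10 (by omega))).symm
  have hdiv : m / 10 ^ e = q * 10 + r / 10 ^ e := by
    have hm' : m = r + 10 ^ e * (q * 10) := by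
      have := Nat.div_add_mod m (10 ^ (e + 1))
      rw [← hq, ← hr] at this
      calc m = 10 ^ (e + 1) * q + r := this.symm
      _ = r + 10 ^ e * (q * 10) := by rw [pow_succ]; ring
    rw [hm', Nat.add_mul_div_left _ _ (Nat.pow_pos (by omega))]
    omega
  rw [hmod, hdiv]
  ring

-- j-fold iteration of A's step equals B's direct mod/div split
theorem pvRot_iter (c m : Nat) (hm : m < 10 ^ c) : ∀ (j : Nat), j ≤ c →
    (fun x => (x % 10 ^ (c - 1)) * 10 + x / 10 ^ (c - 1))^[j] m
      = (m % 10 ^ (c - j)) * 10 ^ j + m / 10 ^ (c - j) := by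
  intro j
  induction j with
  | zero =>
    intro _
    simp [Nat.mod_eq_of_lt hm, Nat.div_eq_of_lt hm]
  | succ j ih =>
    intro hj
    rw [Function.iterate_succ_apply', ih (by omega)]
    have he : c - j = (c - j - 1) + 1 := by omega
    have he2 : c - 1 = (c - j - 1) + j := by omega
    rw [he, he2]
    have he3 : c - (j + 1) = c - j - 1 := by omega
    rw [he3]
    exact pvRot_step_core (c - j - 1) j m (by rw [show c - j - 1 + 1 + j = c by omega]; exact hm)

-- casting the step to the Int-side port
theorem pvStep_natCast (count : Nat) (x : Nat) :
    pvStep count (x : Int) = ((x % 10 ^ (count - 1)) * 10 + x / 10 ^ (count - 1) : Nat) := by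
  rw [pvStep, show ((10 : Int) ^ (count - 1)) = ((10 ^ (count - 1) : Nat) : Int) by push_cast; ring]
  rw [PySem.Int.mod_natCast, PySem.Int.floordiv_natCast]
  push_cast
  ring

theorem pvStep_iterate_natCast (count : Nat) (x : Nat) : ∀ (j : Nat),
    (pvStep count)^[j] (x : Int)
      = (((fun y => (y % 10 ^ (count - 1)) * 10 + y / 10 ^ (count - 1))^[j] x : Nat) : Int) := by
  intro j
  induction j generalizing x with
  | zero => simp
  | succ j ih =>
    rw [Function.iterate_succ_apply, Function.iterate_succ_apply, pvStep_natCast, ih]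

-- ===== primality tests agree =====

theorem pvAIsprime_iff (x : Int) (hx : 2 ≤ x) :
    pvAIsprime x = true ↔ ∀ i : Int, 2 ≤ i → i < x → ¬ (i ∣ x) := by
  rw [pvAIsprime, if_neg (by omega)]
  have hf : (PySem.List.pyRange 2 x 1).foldl
      (fun h i => if PySem.Int.mod x i = 0 then h + 1 else h) (0 : Int)
      = (0 : Int) + ((PySem.List.pyRange 2 x 1).countP (fun i => PySem.Int.mod x i = 0)) := by
    rw [← PySem.List.foldl_count_if (fun i => decide (PySem.Int.mod x i = 0))]
    simp
  rw [hf]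
  simp only [zero_add]
  constructor
  · intro h i h2 hlt hdvd
    rw [if_pos] at h
    · simp at h
    · have hmem : i ∈ PySem.List.pyRange 2 x 1 := PySem.List.mem_pyRange_one.mpr ⟨h2, hlt⟩
      have : (PySem.List.pyRange 2 x 1).countP (fun i => PySem.Int.mod x i = 0) ≠ 0 := by
        rw [Ne, List.countP_eq_zero]
        push Not
        exact ⟨i, hmem, by simp [PySem.Int.mod_eq_zero_iff_dvd, hdvd]⟩
      omega
  · intro h
    rw [if_neg]
    have : (PySem.List.pyRange 2 x 1).countP (fun i => PySem.Int.mod x i = 0) = 0 := by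
      rw [List.countP_eq_zero]
      intro i hmem
      obtain ⟨h2, hlt⟩ := PySem.List.mem_pyRange_one.mp hmem
      simp [PySem.Int.mod_eq_zero_iff_dvd]
      exact h i h2 hlt
    omega

theorem pvBTrial_iff (x : Int) : ∀ (i : Int), 2 ≤ i →
    (pvBTrial x i = true ↔ ∀ t : Int, i ≤ t → t * t ≤ x → ¬ (t ∣ x)) := by
  intro i
  induction i using pvBTrial.induct x with
  | case1 i hle hmod =>
    intro hi
    rw [pvBTrial, dif_pos hle, if_pos hmod]
    simp only [Bool.false_eq_true, false_iff]
    push Not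
    exact ⟨i, le_refl i, hle, (PySem.Int.mod_eq_zero_iff_dvd x i).mp hmod⟩
  | case2 i hle hmod ih =>
    intro hi
    rw [pvBTrial, dif_pos hle, if_neg hmod]
    rw [ih (by omega)]
    constructor
    · intro h t ht htt
      rcases eq_or_lt_of_le ht with heq | hlt
      · rw [← heq]
        exact fun hd => hmod ((PySem.Int.mod_eq_zero_iff_dvd x i).mpr hd)
      · exact h t (by omega) htt
    · intro h t ht htt
      exact h t (by omega) htt
  | case3 i hle =>
    intro hi
    rw [pvBTrial, dif_neg hle]
    simp only [true_iff]
    intro t ht htt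
    have : t * t ≥ i * i := by nlinarith
    omega

theorem pvDivisor_bridge (x : Int) (hx : 2 ≤ x) :
    (∀ i : Int, 2 ≤ i → i < x → ¬ (i ∣ x)) ↔ (∀ i : Int, 2 ≤ i → i * i ≤ x → ¬ (i ∣ x)) := by
  constructor
  · intro h i h2 hii
    exact h i h2 (by nlinarith)
  · intro h i h2 hlt hdvd
    obtain ⟨e, he⟩ := hdvd
    have hipos : 0 < i := by omega
    have hepos : 0 < e := by nlinarith
    have he2 : 2 ≤ e := by
      by_contra hh
      have : e = 1 := by omega
      rw [this, mul_one] at he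
      omega
    rcases le_total i e with hie | hei
    · exact h i h2 (by nlinarith) ⟨e, he⟩
    · exact h e he2 (by nlinarith) ⟨i, by rw [he]; ring⟩

theorem pvIsprime_agree (x : Int) (hx : 0 ≤ x) : pvAIsprime x = pvBIsprime x := by
  rcases lt_or_ge x 2 with h2 | h2
  · interval_cases x
    · rfl
    · rfl
  · have hA := pvAIsprime_iff x h2
    have hB : pvBIsprime x = true ↔ ∀ t : Int, 2 ≤ t → t * t ≤ x → ¬ (t ∣ x) := by
      rw [pvBIsprime, if_neg (by omega)]
      exact pvBTrial_iff x 2 (le_refl _)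
    have hbr := pvDivisor_bridge x h2
    by_cases hp : ∀ i : Int, 2 ≤ i → i < x → ¬ (i ∣ x)
    · rw [hA.mpr hp, (hB.mpr (hbr.mp hp)).symm]
    · have ha : pvAIsprime x = false := by
        cases h : pvAIsprime x
        · rfl
        · exact absurd (hA.mp h) hp
      have hb : pvBIsprime x = false := by
        cases h : pvBIsprime x
        · rfl
        · exact absurd (hbr.mpr (hB.mp h)) hp
      rw [ha, hb]

-- ===== VERDICT (by name: the statement is the Claim_ definition above) =====
theorem ischarkhesh_spec : Claim_equal_ischarkhesh := by
  intro n _ hpre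
  unfold Spec_ischarkhesh
  have hnm : ((n.toNat : Nat) : Int) = n := Int.toNat_of_nonneg hpre
  rw [← hnm]
  set m := n.toNat with hmdef
  clear_value m
  clear hnm hmdef hpre
  set c := pvND m with hcdef
  have hmlt : m < 10 ^ c := pvND_lt m
  -- the digit-count loops of the two ports compute the same number c
  have hcount : (pvACountLoop (((m : Int)).natAbs + 1) (m : Int) ([], 0)).2 = c := by
    rw [Int.natAbs_natCast]
    rw [pvACountLoop_spec (m + 1) m (by omega) [] 0]
    omega
  have hpow : pvBPowLoop (m : Int) (((m : Int)).natAbs + 1) 0 = c := by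
    rw [Int.natAbs_natCast]
    rw [pvBPowLoop_spec (m : Int) (by positivity) (m + 1) 0 (by omega)
      (by simp only [Int.toNat_natCast]; have := pvND_le_self m; omega)]
    simp [hcdef]
  -- both rotation expressions are the cast of the same natural number
  have hrotA : ∀ jn : Nat, jn ≤ c → (pvStep c)^[jn] ((m : Nat) : Int)
      = (((m % 10 ^ (c - jn)) * 10 ^ jn + m / 10 ^ (c - jn) : Nat) : Int) := by
    intro jn hjn
    rw [pvStep_iterate_natCast, pvRot_iter c m hmlt jn hjn]
  have hrotB : ∀ jn : Nat,
      PySem.Int.mod ((m : Nat) : Int) ((10 : Int) ^ (c - jn)) * (10 : Int) ^ jn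
        + PySem.Int.floordiv ((m : Nat) : Int) ((10 : Int) ^ (c - jn))
      = (((m % 10 ^ (c - jn)) * 10 ^ jn + m / 10 ^ (c - jn) : Nat) : Int) := by
    intro jn
    rw [show ((10 : Int) ^ (c - jn)) = ((10 ^ (c - jn) : Nat) : Int) by push_cast; ring]
    rw [PySem.Int.mod_natCast, PySem.Int.floordiv_natCast]
    push_cast
    ring
  have key : ∀ jn : Nat, jn ≤ c →
      pvAIsprime ((pvStep c)^[jn] ((m : Nat) : Int))
      = pvBIsprime (PySem.Int.mod ((m : Nat) : Int) ((10 : Int) ^ (c - jn)) * (10 : Int) ^ jn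
        + PySem.Int.floordiv ((m : Nat) : Int) ((10 : Int) ^ (c - jn))) := by
    intro jn hjn
    rw [hrotA jn hjn, hrotB jn]
    exact pvIsprime_agree _ (by positivity)
  -- evaluate the two ports
  have hA : ischarkhesh (m : Int)
      = if (List.range c).countP (fun j => pvAIsprime ((pvStep c)^[j + 1] ((m : Nat) : Int))) = c
        then some true else none := by
    rw [ischarkhesh]
    simp only [hcount]
    rw [pvAOuter_spec (m : Int) c c (le_refl c)]
  have hB : ischarkhesh_alt (m : Int)
      = if (PySem.List.pyRange 1 ((c : Int) + 1) 1).all (fun j =>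
          pvBIsprime (PySem.Int.mod (m : Int) (10 ^ (c - j.toNat)) * 10 ^ j.toNat
            + PySem.Int.floordiv (m : Int) (10 ^ (c - j.toNat))))
        then some true else none := by
    rw [ischarkhesh_alt]
    simp only [hpow]
  rw [hA, hB]
  -- the two all-rotations-prime conditions are equivalent
  have hiff : ((List.range c).countP
        (fun j => pvAIsprime ((pvStep c)^[j + 1] ((m : Nat) : Int))) = c)
      ↔ ((PySem.List.pyRange 1 ((c : Int) + 1) 1).all (fun j =>
          pvBIsprime (PySem.Int.mod (m : Int) (10 ^ (c - j.toNat)) * 10 ^ j.toNat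
            + PySem.Int.floordiv (m : Int) (10 ^ (c - j.toNat)))) = true) := by
    have hlen : (List.range c).length = c := by simp
    have hcnt := List.countP_eq_length
      (p := fun j => pvAIsprime ((pvStep c)^[j + 1] ((m : Nat) : Int))) (l := List.range c)
    rw [hlen] at hcnt
    rw [hcnt, List.all_eq_true]
    simp only [List.mem_range]
    constructor
    · intro h j hj
      obtain ⟨h1, h2⟩ := PySem.List.mem_pyRange_one.mp hj
      have hj' : j = ((j.toNat : Nat) : Int) := (Int.toNat_of_nonneg (by omega)).symm
      have hjn1 : 1 ≤ j.toNat := by omega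
      have hjn2 : j.toNat ≤ c := by omega
      have := h (j.toNat - 1) (by omega)
      rw [show j.toNat - 1 + 1 = j.toNat by omega] at this
      rw [hj']
      simp only [Int.toNat_natCast]
      rw [← key j.toNat hjn2]
      exact this
    · intro h j hj
      have hmem : ((j + 1 : Nat) : Int) ∈ PySem.List.pyRange 1 ((c : Int) + 1) 1 :=
        PySem.List.mem_pyRange_one.mpr ⟨by omega, by omega⟩
      have := h ((j + 1 : Nat) : Int) hmem
      rw [key (j + 1) (by omega)]
      simpa using this
  by_cases hcond : (List.range c).countP
      (fun j => pvAIsprime ((pvStep c)^[j + 1] ((m : Nat) : Int))) = c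
  · rw [if_pos hcond, if_pos (hiff.mp hcond)]
  · rw [if_neg hcond, if_neg (fun hh => hcond (hiff.mpr hh))]
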